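-- pv_equiv track=rewrite | github.com/tuti0fruti/university | INFORMATICS/exe3.py | list_of_symbols_after_dot
-- ===== SOURCE A (Python) =====
-- def list_of_symbols_after_dot(x):
--     temp = str(x)
--     i = 0
--     count = "01"
--     while i < len(temp)-1:
--         if temp[i] == '.':
--             count = "0."
--             while i + 1 < len(temp)-1:
--                 count += '0'
--                 i += 1
--             count += '1'
--         else:
--             count = '01'
--         i += 1
--     return count
-- ===== SOURCE B (Python) =====
-- def list_of_symbols_after_dot(x):
--     s = str(x)
--     d = s.find('.')
--     if d == -1 or d >= len(s) - 1:
--         return "01"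
--     return "0." + "0" * (len(s) - d - 2) + "1"
-- ===== Notes on version B (the rewrite author's own statement) =====
-- stated objective: simpler
-- what changed: Replaces A's outer scan-for-dot loop and inner zero-accumulating loop by a single find of the first dot plus a closed-form string expression (prefix, repeated zeros, trailing one) maintaining no loop state.
import Mathlib
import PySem

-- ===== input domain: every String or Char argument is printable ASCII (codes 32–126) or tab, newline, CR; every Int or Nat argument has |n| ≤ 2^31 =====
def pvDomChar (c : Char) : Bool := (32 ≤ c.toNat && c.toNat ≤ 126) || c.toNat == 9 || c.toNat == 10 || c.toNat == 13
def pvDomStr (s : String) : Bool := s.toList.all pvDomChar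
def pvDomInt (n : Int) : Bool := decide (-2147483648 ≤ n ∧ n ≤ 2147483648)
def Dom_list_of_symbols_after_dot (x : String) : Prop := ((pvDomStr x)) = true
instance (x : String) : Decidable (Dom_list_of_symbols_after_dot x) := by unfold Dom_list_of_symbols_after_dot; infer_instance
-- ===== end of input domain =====

-- B replaces A's scan-for-dot loop and inner zero-appending loop with a single find plus a
-- closed-form string expression (objective: simpler).

-- ===== PORT A =====
-- inner 'while i + 1 < len(temp)-1: count += "0"; i += 1' (state: i, count); structural fuel
-- recursion (fuel = len(temp) always suffices, the loop advances i each step)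
def pvInnerA (fuel : Nat) (n i : Nat) (count : List Char) : Nat × List Char :=
  match fuel with
  | 0 => (i, count)
  | fuel + 1 =>
    if i + 1 < n - 1 then pvInnerA fuel n (i + 1) (count ++ ['0']) else (i, count)

-- outer 'while i < len(temp)-1: …' (state: i, count)
def pvOuterA (fuel : Nat) (cs : List Char) (i : Nat) (count : List Char) : List Char :=
  match fuel with
  | 0 => count
  | fuel + 1 =>
    if i < cs.length - 1 then
      if cs[i]? = some '.' then
        let p := pvInnerA cs.length cs.length i ['0', '.']
        pvOuterA fuel cs (p.1 + 1) (p.2 ++ ['1'])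
      else
        pvOuterA fuel cs (i + 1) ['0', '1']
    else count

def list_of_symbols_after_dot (x : String) : String :=
  String.ofList (pvOuterA x.toList.length x.toList 0 ['0', '1'])

-- ===== PORT B =====
def list_of_symbols_after_dot_alt (x : String) : String :=
  let d : Int := PySem.Str.find x "."
  if d = -1 ∨ d ≥ (x.toList.length : Int) - 1 then "01"
  else "0." ++ String.ofList (List.replicate ((x.toList.length : Int) - d - 2).toNat '0') ++ "1"

-- ===== PRECONDITION & SPEC =====
def Spec_list_of_symbols_after_dot (x : String) (out : String) : Prop := out = list_of_symbols_after_dot_alt x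
instance (x : String) (out : String) : Decidable (Spec_list_of_symbols_after_dot x out) := by unfold Spec_list_of_symbols_after_dot; infer_instance

-- ===== CLAIM (what is proved, stated in full; the proofs are below) =====
def Claim_equal_list_of_symbols_after_dot : Prop := ∀ (x : String), Dom_list_of_symbols_after_dot x → Spec_list_of_symbols_after_dot x (list_of_symbols_after_dot x)

-- ===== LEMMAS AND PROOFS =====

-- singleton-prefix of a drop = character at that index
lemma prefix_drop_singleton (cs : List Char) (j : Nat) :
    ['.'] <+: cs.drop j ↔ cs[j]? = some '.' := by
  constructor
  · rintro ⟨t, ht⟩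
    have : (cs.drop j)[0]? = some '.' := by rw [← ht]; rfl
    simpa [List.getElem?_drop] using this
  · intro h
    have h0 : (cs.drop j)[0]? = some '.' := by simpa [List.getElem?_drop] using h
    cases hd : cs.drop j with
    | nil => simp [hd] at h0
    | cons a t =>
      rw [hd] at h0
      simp at h0
      exact ⟨t, by simp [h0]⟩

lemma pvInnerA_eq (fuel n i : Nat) (c : List Char) (h : i ≤ n - 2) (hf : n - 2 - i ≤ fuel) :
    pvInnerA fuel n i c = (n - 2, c ++ List.replicate (n - 2 - i) '0') := by
  induction fuel generalizing i c with
  | zero =>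
    have : i = n - 2 := by omega
    simp [pvInnerA, this]
  | succ fuel ih =>
    unfold pvInnerA
    split
    · rw [ih (i + 1) (c ++ ['0']) (by omega) (by omega)]
      have : n - 2 - i = (n - 2 - (i + 1)) + 1 := by omega
      rw [this]
      simp [List.replicate_succ, List.append_assoc]
    · have : i = n - 2 := by omega
      simp [this]

-- no dot in the window [i, len-1) ⇒ the outer loop leaves "01"
lemma pvOuterA_no_dot (fuel : Nat) (cs : List Char) (i : Nat)
    (h : ∀ j, i ≤ j → j < cs.length - 1 → cs[j]? ≠ some '.') :
    pvOuterA fuel cs i ['0', '1'] = ['0', '1'] := by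
  induction fuel generalizing i with
  | zero => rfl
  | succ fuel ih =>
    unfold pvOuterA
    split
    · rename_i hi
      rw [if_neg (h i le_rfl hi)]
      exact ih (i + 1) (fun j hj hj' => h j (by omega) hj')
    · rfl

-- first dot at d in the window ⇒ the outer loop returns "0." ++ zeros ++ "1"
lemma pvOuterA_dot (fuel : Nat) (cs : List Char) (i d : Nat) (c : List Char)
    (hid : i ≤ d) (hd : d < cs.length - 1) (hdot : cs[d]? = some '.')
    (hfirst : ∀ j, i ≤ j → j < d → cs[j]? ≠ some '.')
    (hf : cs.length - 1 - i ≤ fuel) :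
    pvOuterA fuel cs i c = ['0', '.'] ++ List.replicate (cs.length - 2 - d) '0' ++ ['1'] := by
  induction fuel generalizing i c with
  | zero => omega
  | succ fuel ih =>
    unfold pvOuterA
    rw [if_pos (by omega)]
    by_cases hi : i = d
    · subst hi
      rw [if_pos hdot]
      rw [pvInnerA_eq cs.length cs.length i ['0', '.'] (by omega) (by omega)]
      cases fuel with
      | zero => simp [pvOuterA]
      | succ fuel =>
        unfold pvOuterA
        rw [if_neg (by omega)]
    · rw [if_neg (hfirst i le_rfl (by omega))]
      exact ih (i + 1) ['0', '1'] (by omega)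
        (fun j hj hj' => hfirst j (by omega) hj') (by omega)

-- ===== VERDICT (by name: the statement is the Claim_ definition above) =====
theorem list_of_symbols_after_dot_spec : Claim_equal_list_of_symbols_after_dot := by
  intro x _
  unfold Spec_list_of_symbols_after_dot list_of_symbols_after_dot list_of_symbols_after_dot_alt
  set cs := x.toList with hcs
  have hfind : PySem.Str.find x "." = PySem.Chars.find cs ['.'] := by
    simp [PySem.Str.find_eq, hcs]
  rw [hfind]
  set f : Int := PySem.Chars.find cs ['.'] with hf
  by_cases h1 : f = -1
  · rw [if_pos (Or.inl h1)]
    have hno : ¬ (['.'] <:+: cs) := (PySem.Chars.find_eq_neg_one_iff cs ['.']).1 (hf ▸ h1)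
    have hnd : ∀ j, 0 ≤ j → j < cs.length - 1 → cs[j]? ≠ some '.' := by
      intro j _ _ hj
      exact hno (((prefix_drop_singleton cs j).2 hj).isInfix.trans (cs.drop_suffix j).isInfix)
    rw [pvOuterA_no_dot cs.length cs 0 hnd]
  · have hpos : 0 ≤ f := by
      have := PySem.Chars.neg_one_le_find (s := cs) (sub := ['.'])
      omega
    obtain ⟨hpre, hmin⟩ := PySem.Chars.find_spec (s := cs) (sub := ['.']) hpos
    have hdot : cs[f.toNat]? = some '.' := (prefix_drop_singleton cs f.toNat).1 hpre
    have hlt : f.toNat < cs.length := by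
      by_contra hge
      simp [List.getElem?_eq_none (by omega : cs.length ≤ f.toNat)] at hdot
    by_cases h2 : f ≥ (cs.length : Int) - 1
    · rw [if_pos (Or.inr h2)]
      have hnd : ∀ j, 0 ≤ j → j < cs.length - 1 → cs[j]? ≠ some '.' := by
        intro j _ hj hjdot
        have : ¬ ['.'] <+: cs.drop j := hmin j (by omega)
        exact this ((prefix_drop_singleton cs j).2 hjdot)
      rw [pvOuterA_no_dot cs.length cs 0 hnd]
    · rw [if_neg (by rw [not_or]; exact ⟨h1, by omega⟩)]
      have hdlt : f.toNat < cs.length - 1 := by omega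
      have hfirst : ∀ j, 0 ≤ j → j < f.toNat → cs[j]? ≠ some '.' := by
        intro j _ hj hjdot
        exact hmin j hj ((prefix_drop_singleton cs j).2 hjdot)
      rw [pvOuterA_dot cs.length cs 0 f.toNat ['0', '1'] (Nat.zero_le _) hdlt hdot hfirst (by omega)]
      have hk : ((cs.length : Int) - f - 2).toNat = cs.length - 2 - f.toNat := by omega
      rw [hk]
      have h01 : ("0." : String) = String.ofList ['0', '.'] := rfl
      have h11 : ("1" : String) = String.ofList ['1'] := rfl
      rw [h01, h11, ← String.ofList_append, ← String.ofList_append]
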